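-- pv_equiv track=rewrite | github.com/ArunAaryan/practice_dsa | MinimumSwapsToBringKTogether.py | minSwapToBringElements
-- ===== SOURCE A (Python) =====
-- def minSwapToBringElements(arr, k):
--     right = 0
--     for i in arr:
--         if i <= k:
--             right += 1
--     greater = 0
--     for i in range(right):
--         if arr[i] > k:
--             greater += 1
--     left = 0
--     ans = greater
--     while right < len(arr):
--         if arr[left] > k:
--             greater -= 1
--         if arr[right] > k:
--             greater += 1
--         ans = min(ans, greater)
--         left += 1
--         right += 1
--     return ans
-- ===== SOURCE B (Python) =====
-- def minSwapToBringElements(arr, k):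
--     n = len(arr)
--     w = sum(1 for x in arr if x <= k)
--     P = [0] * (n + 1)
--     for i, x in enumerate(arr):
--         P[i + 1] = P[i] + (1 if x <= k else 0)
--     best = max(P[s + w] - P[s] for s in range(n - w + 1))
--     return w - best
-- ===== Notes on version B (the rewrite author's own statement) =====
-- stated objective: alternative
-- what changed: Replaces A's sliding-window min of bad elements (explicit left/right pointer loop maintaining a running count) by a prefix-sum array over which every window's count of good elements is read off directly, returning W minus the maximum good count.
import Mathlib
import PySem

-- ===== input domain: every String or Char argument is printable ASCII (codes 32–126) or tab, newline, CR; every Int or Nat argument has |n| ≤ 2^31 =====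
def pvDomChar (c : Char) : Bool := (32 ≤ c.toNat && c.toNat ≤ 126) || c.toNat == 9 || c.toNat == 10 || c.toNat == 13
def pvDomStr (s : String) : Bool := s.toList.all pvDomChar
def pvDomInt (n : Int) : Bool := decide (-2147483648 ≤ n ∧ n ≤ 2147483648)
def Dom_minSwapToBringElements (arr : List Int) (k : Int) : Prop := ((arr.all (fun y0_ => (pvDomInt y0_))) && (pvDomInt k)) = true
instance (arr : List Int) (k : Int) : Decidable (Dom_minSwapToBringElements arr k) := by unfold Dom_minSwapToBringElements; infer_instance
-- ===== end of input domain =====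

-- B replaces A's pointer-pair sliding-window minimum by a prefix-sum array read per window (alternative decomposition, same cost).

-- ===== PORT A =====
-- the 'while right < len(arr)' loop, step for step
def pvALoop (arr : List Int) (k : Int) (left right : Nat) (greater ans : Int) : Int :=
  if _h : right < arr.length then
    let g1 := if k < PySem.List.pyGetD arr (left : Int) 0 then greater - 1 else greater
    let g2 := if k < PySem.List.pyGetD arr (right : Int) 0 then g1 + 1 else g1
    pvALoop arr k (left + 1) (right + 1) g2 (min ans g2)
  else ans
termination_by arr.length - right

def minSwapToBringElements (arr : List Int) (k : Int) : Int :=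
  let right := arr.foldl (fun acc i => if i ≤ k then acc + 1 else acc) (0 : Nat)
  let greater := (List.range right).foldl
    (fun g (i : Nat) => if k < PySem.List.pyGetD arr (i : Int) 0 then g + 1 else g) (0 : Int)
  pvALoop arr k 0 right greater greater

-- ===== PORT B =====
def minSwapToBringElements_alt (arr : List Int) (k : Int) : Int :=
  let n := arr.length
  let w := arr.countP (fun x => decide (x ≤ k))
  let P := arr.scanl (fun acc x => acc + (if x ≤ k then 1 else 0)) (0 : Int)
  let vals := (List.range (n - w + 1)).map (fun s => P.getD (s + w) 0 - P.getD s 0)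
  let best := match vals with
    | [] => (0 : Int)
    | h :: t => t.foldl max h
  (w : Int) - best

-- ===== PRECONDITION & SPEC =====
def Spec_minSwapToBringElements (arr : List Int) (k : Int) (out : Int) : Prop := out = minSwapToBringElements_alt arr k
instance (arr : List Int) (k : Int) (out : Int) : Decidable (Spec_minSwapToBringElements arr k out) := by unfold Spec_minSwapToBringElements; infer_instance

-- ===== CLAIM (what is proved, stated in full; the proofs are below) =====
def Claim_equal_minSwapToBringElements : Prop := ∀ (arr : List Int) (k : Int), Dom_minSwapToBringElements arr k → Spec_minSwapToBringElements arr k (minSwapToBringElements arr k)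

-- ===== LEMMAS AND PROOFS =====

-- number of elements > k in the window of width w starting at s
def pvG (arr : List Int) (k : Int) (w s : Nat) : Int :=
  (((arr.drop s).take w).countP (fun x => decide (k < x)) : Int)

-- number of elements ≤ k in the window of width w starting at s
def pvC (arr : List Int) (k : Int) (w s : Nat) : Int :=
  (((arr.drop s).take w).countP (fun x => decide (x ≤ k)) : Int)

theorem pvA_fold1 (k : Int) (xs : List Int) (a : Nat) :
    xs.foldl (fun acc i => if i ≤ k then acc + 1 else acc) a
      = a + xs.countP (fun x => decide (x ≤ k)) := by
  induction xs generalizing a with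
  | nil => simp
  | cons x xs ih =>
    by_cases h : x ≤ k <;> simp [List.countP_cons, h, ih] <;> omega

theorem pvA_fold2 (arr : List Int) (k : Int) (w : Nat) (hw : w ≤ arr.length) (g : Int) :
    (List.range w).foldl
      (fun g (i : Nat) => if k < PySem.List.pyGetD arr (i : Int) 0 then g + 1 else g) g
      = g + ((arr.take w).countP (fun x => decide (k < x)) : Int) := by
  induction w generalizing g with
  | zero => simp
  | succ m ih =>
    have hm : m < arr.length := hw
    rw [List.range_succ, List.foldl_append]
    rw [ih (Nat.le_of_lt hm)]
    have htake : arr.take (m + 1) = arr.take m ++ [arr[m]] := by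
      rw [List.take_succ, List.getElem?_eq_getElem hm]; rfl
    rw [htake]
    simp only [List.foldl_cons, List.foldl_nil, PySem.List.pyGetD_natCast,
      List.getD_eq_getElem?_getD, List.getElem?_eq_getElem hm, List.countP_append]
    by_cases h : k < arr[m] <;> simp [h] <;> push_cast <;> ring

-- shift of the window by one
theorem pvG_shift (arr : List Int) (k : Int) (w s : Nat) (h : s + w < arr.length) :
    pvG arr k w (s + 1) =
      pvG arr k w s - (if k < arr[s]'(by omega) then 1 else 0)
        + (if k < arr[s + w] then 1 else 0) := by
  have hs : s < arr.length := by omega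
  have h1 : (arr.drop s).take (w + 1) = arr[s] :: (arr.drop (s + 1)).take w := by
    rw [List.drop_eq_getElem_cons hs]; rfl
  have h2 : (arr.drop s).take (w + 1) = (arr.drop s).take w ++ [arr[s + w]] := by
    rw [List.take_succ]
    have : (arr.drop s)[w]? = some arr[s + w] := by
      rw [List.getElem?_drop, List.getElem?_eq_getElem h]
    rw [this]; rfl
  have := congrArg (fun l => l.countP (fun x => decide (k < x))) (h1.symm.trans h2)
  simp only [List.countP_cons, List.countP_append, List.countP_nil] at this
  unfold pvG
  by_cases ha : k < arr[s]'hs <;> by_cases hb : k < arr[s + w] <;>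
    simp [ha, hb] at this ⊢ <;> omega

theorem pvALoop_spec (arr : List Int) (k : Int) (w : Nat) :
    ∀ (d s : Nat) (a : Int), arr.length - (s + w) = d → s + w ≤ arr.length →
    pvALoop arr k s (s + w) (pvG arr k w s) a
      = (List.range' (s + 1) (arr.length - (s + w))).foldl
          (fun acc t => min acc (pvG arr k w t)) a := by
  intro d
  induction d with
  | zero =>
    intro s a hd hle
    rw [pvALoop, hd]
    have h : ¬ s + w < arr.length := by omega
    simp [h]
  | succ m ih =>
    intro s a hd hle
    have h : s + w < arr.length := by omega
    have hs : s < arr.length := by omega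
    rw [pvALoop]
    simp only [h, dif_pos]
    have e1 : PySem.List.pyGetD arr (s : Int) 0 = arr[s] := by
      rw [PySem.List.pyGetD_natCast, List.getD_eq_getElem?_getD,
        List.getElem?_eq_getElem hs]; rfl
    have e2 : PySem.List.pyGetD arr ((s + w : Nat) : Int) 0 = arr[s + w] := by
      rw [PySem.List.pyGetD_natCast, List.getD_eq_getElem?_getD,
        List.getElem?_eq_getElem h]; rfl
    have hg2 :
        (if k < PySem.List.pyGetD arr ((s + w : Nat) : Int) 0 then
            (if k < PySem.List.pyGetD arr (s : Int) 0 then pvG arr k w s - 1 else pvG arr k w s) + 1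
          else
            (if k < PySem.List.pyGetD arr (s : Int) 0 then pvG arr k w s - 1 else pvG arr k w s))
          = pvG arr k w (s + 1) := by
      rw [e1, e2, pvG_shift arr k w s h]
      by_cases ha : k < arr[s]'hs <;> by_cases hb : k < arr[s + w] <;>
        simp [ha, hb] <;> ring
    rw [hg2]
    have hrec := ih (s + 1) (min a (pvG arr k w (s + 1))) (by omega) (by omega)
    have harg : s + 1 + w = s + w + 1 := by omega
    rw [harg] at hrec
    rw [hrec]
    have hlen : arr.length - (s + w) = (arr.length - (s + w + 1)) + 1 := by omega
    rw [hlen, List.range'_succ, List.foldl_cons]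

-- A's result as a fold of window minima
theorem pvA_char (arr : List Int) (k : Int) :
    minSwapToBringElements arr k =
      (List.range' 1 (arr.length - arr.countP (fun x => decide (x ≤ k)))).foldl
        (fun acc t => min acc (pvG arr k (arr.countP (fun x => decide (x ≤ k))) t))
        (pvG arr k (arr.countP (fun x => decide (x ≤ k))) 0) := by
  unfold minSwapToBringElements
  set w := arr.countP (fun x => decide (x ≤ k)) with hw
  have hwle : w ≤ arr.length := List.countP_le_length
  have h1 : arr.foldl (fun acc i => if i ≤ k then acc + 1 else acc) (0 : Nat) = w := by
    rw [pvA_fold1]; omega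
  have h2 : (List.range w).foldl
      (fun g (i : Nat) => if k < PySem.List.pyGetD arr (i : Int) 0 then g + 1 else g) (0 : Int)
      = pvG arr k w 0 := by
    rw [pvA_fold2 arr k w hwle]; unfold pvG; simp
  simp only [h1, h2]
  have := pvALoop_spec arr k w (arr.length - w) 0 (pvG arr k w 0) (by omega) (by omega)
  simpa using this

-- scanl prefix characterisation
theorem pvScanl_getD (k : Int) (xs : List Int) :
    ∀ (s : Nat) (a : Int), s ≤ xs.length →
    (xs.scanl (fun acc x => acc + (if x ≤ k then 1 else 0)) a).getD s 0
      = (xs.take s).foldl (fun acc x => acc + (if x ≤ k then 1 else 0)) a := by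
  induction xs with
  | nil =>
    intro s a h
    have : s = 0 := by simpa using h
    subst this; simp
  | cons x xs ih =>
    intro s a h
    cases s with
    | zero => rw [List.scanl_cons]; simp
    | succ m =>
      rw [List.scanl_cons]
      simp only [List.take_succ_cons, List.foldl_cons, List.getD_cons_succ]
      exact ih m _ (by simpa using h)

theorem pvB_fold (k : Int) (xs : List Int) (a : Int) :
    xs.foldl (fun acc x => acc + (if x ≤ k then 1 else 0)) a
      = a + (xs.countP (fun x => decide (x ≤ k)) : Int) := by
  induction xs generalizing a with
  | nil => simp
  | cons x xs ih =>
    by_cases h : x ≤ k <;> simp [List.countP_cons, h, ih] <;> push_cast <;> ring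

-- each prefix-sum difference is the window's good count
theorem pvP_diff (arr : List Int) (k : Int) (s : Nat)
    (h : s + arr.countP (fun x => decide (x ≤ k)) ≤ arr.length) :
    (arr.scanl (fun acc x => acc + (if x ≤ k then 1 else 0)) (0 : Int)).getD
        (s + arr.countP (fun x => decide (x ≤ k))) 0
      - (arr.scanl (fun acc x => acc + (if x ≤ k then 1 else 0)) (0 : Int)).getD s 0
      = pvC arr k (arr.countP (fun x => decide (x ≤ k))) s := by
  set w := arr.countP (fun x => decide (x ≤ k)) with hw
  rw [pvScanl_getD k arr (s + w) 0 h, pvScanl_getD k arr s 0 (by omega),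
    pvB_fold, pvB_fold]
  have htake : arr.take (s + w) = arr.take s ++ (arr.drop s).take w := by
    rw [List.take_add]
  rw [htake]
  unfold pvC
  simp [List.countP_append]

-- complement inside a full window: good + bad = w
theorem pvCG (arr : List Int) (k : Int) (s : Nat)
    (h : s + arr.countP (fun x => decide (x ≤ k)) ≤ arr.length) :
    pvC arr k (arr.countP (fun x => decide (x ≤ k))) s
      = (arr.countP (fun x => decide (x ≤ k)) : Int)
        - pvG arr k (arr.countP (fun x => decide (x ≤ k))) s := by
  set w := arr.countP (fun x => decide (x ≤ k)) with hw
  have hlen : ((arr.drop s).take w).length = w := by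
    simp [List.length_take, List.length_drop]; omega
  have hsplit := List.length_eq_countP_add_countP (p := fun x => decide (x ≤ k))
    (l := (arr.drop s).take w)
  have hq : ((arr.drop s).take w).countP (fun a => decide (¬ (decide (a ≤ k) = true)))
      = ((arr.drop s).take w).countP (fun x => decide (k < x)) :=
    List.countP_congr (by intro x _; simp [not_le])
  unfold pvC pvG
  rw [hlen, hq] at hsplit
  omega

-- min/max duality of the two folds
theorem pvMinMax (w : Int) (f g : Nat → Int) :
    ∀ (L : List Nat) (a : Int), (∀ t ∈ L, g t = w - f t) →
    w - L.foldl (fun acc t => max acc (g t)) (w - a)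
      = L.foldl (fun acc t => min acc (f t)) a := by
  intro L
  induction L with
  | nil => intro a _; simp
  | cons t L ih =>
    intro a h
    simp only [List.foldl_cons]
    rw [h t (by simp)]
    have e : max (w - a) (w - f t) = w - min a (f t) := by
      rcases le_total a (f t) with h' | h' <;>
        simp [min_def, max_def, h'] <;> omega
    rw [e, ih (min a (f t)) (fun u hu => h u (by simp [hu]))]

theorem minSwapToBringElements_spec : Claim_equal_minSwapToBringElements := by
  unfold Claim_equal_minSwapToBringElements
  intro arr k _
  unfold Spec_minSwapToBringElements minSwapToBringElements_alt
  set w := arr.countP (fun x => decide (x ≤ k)) with hw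
  have hwle : w ≤ arr.length := List.countP_le_length
  set n := arr.length with hn
  simp only []
  have hrange : List.range (n - w + 1) = 0 :: List.range' 1 (n - w) := by
    rw [List.range_eq_range', List.range'_succ]
  rw [hrange]
  simp only [List.map_cons]
  have hC : ∀ s : Nat, s ≤ n - w →
      (arr.scanl (fun acc x => acc + (if x ≤ k then 1 else 0)) (0 : Int)).getD (s + w) 0
        - (arr.scanl (fun acc x => acc + (if x ≤ k then 1 else 0)) (0 : Int)).getD s 0
      = (w : Int) - pvG arr k w s := by
    intro s hs
    rw [pvP_diff arr k s (by omega), pvCG arr k s (by omega)]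
  rw [pvA_char arr k]
  rw [← hw, ← hn]
  have h0 : (arr.scanl (fun acc x => acc + (if x ≤ k then 1 else 0)) (0 : Int)).getD (0 + w) 0
      - (arr.scanl (fun acc x => acc + (if x ≤ k then 1 else 0)) (0 : Int)).getD 0 0
      = (w : Int) - pvG arr k w 0 := hC 0 (by omega)
  simp only [Nat.zero_add] at h0 ⊢
  rw [h0]
  rw [List.foldl_map]
  have := pvMinMax (w : Int) (fun t => pvG arr k w t)
    (fun s => (arr.scanl (fun acc x => acc + (if x ≤ k then 1 else 0)) (0 : Int)).getD (s + w) 0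
      - (arr.scanl (fun acc x => acc + (if x ≤ k then 1 else 0)) (0 : Int)).getD s 0)
    (List.range' 1 (n - w)) (pvG arr k w 0)
    (by intro t ht; exact hC t (by simp [List.mem_range'] at ht; omega))
  rw [this]
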